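-- pv_equiv track=rewrite | github.com/pc5401/my_BOJ | 백준/Gold/2229. 조 짜기/조 짜기.py | solve
-- ===== SOURCE A (Python) =====
-- def solve(N, A):
--     dp = [0] * (N + 1)
--     for i in range(1, N + 1):
--         mx = mn = A[i - 1]
--         best = 0
--         for j in range(i - 1, -1, -1):
--             if A[j] > mx:
--                 mx = A[j]
--             if A[j] < mn:
--                 mn = A[j]
--             val = dp[j] + (mx - mn)
--             if val > best:
--                 best = val
--         dp[i] = best
--     return dp[N]
-- ===== SOURCE B (Python) =====
-- def solve(N, A):
--     # One forward pass: for every possible start of the current (last) group we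
--     # keep a candidate (running max, running min, dp-value before the group);
--     # each new element updates every candidate in place.
--     best = 0
--     cands = []
--     for i in range(N):
--         x = A[i]
--         cands = [(mx if mx > x else x, mn if mn < x else x, b) for (mx, mn, b) in cands]
--         cands.append((x, x, best))
--         best = max(b + (mx - mn) for (mx, mn, b) in cands)
--     return best
-- ===== Notes on version B (the rewrite author's own statement) =====
-- stated objective: alternative
-- what changed: A fills a dp array with a nested backward scan re-deriving segment max/min per (i,j); B makes one forward pass over the prefix, maintaining for every possible start of the last group a candidate triple (segment max, segment min, dp value) that is updated in place by each new element, so the dp array and the inner index loop disappear.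
import Mathlib
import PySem

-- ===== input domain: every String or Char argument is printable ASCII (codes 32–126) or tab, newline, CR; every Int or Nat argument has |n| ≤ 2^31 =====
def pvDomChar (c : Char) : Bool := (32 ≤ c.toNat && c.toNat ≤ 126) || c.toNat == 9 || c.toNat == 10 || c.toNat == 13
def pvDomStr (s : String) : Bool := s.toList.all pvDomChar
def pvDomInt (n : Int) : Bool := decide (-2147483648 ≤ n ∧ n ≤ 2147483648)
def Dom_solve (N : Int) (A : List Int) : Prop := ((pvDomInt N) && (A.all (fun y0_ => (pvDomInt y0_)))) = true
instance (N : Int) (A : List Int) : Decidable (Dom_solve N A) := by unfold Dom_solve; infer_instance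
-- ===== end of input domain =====

-- B makes one forward pass keeping per-start candidate triples instead of A's dp array with a
-- nested backward scan; same O(N^2) cost, genuinely different traversal (objective: alternative).

-- ===== PORT A =====
-- inner loop body: for j in range(i-1,-1,-1): update mx/mn, val = dp[j]+(mx-mn), best
def innerStep (A dp : List Int) (s : Int × Int × Int) (j : Int) : Int × Int × Int :=
  let aj := PySem.List.pyGetD A j 0
  let mx := if aj > s.1 then aj else s.1
  let mn := if aj < s.2.1 then aj else s.2.1
  let val := PySem.List.pyGetD dp j 0 + (mx - mn)
  (mx, mn, if val > s.2.2 then val else s.2.2)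

-- outer loop body: mx = mn = A[i-1]; best = 0; inner loop; dp[i] = best
def outerStep (A : List Int) (dp : List Int) (i : Int) : List Int :=
  let a := PySem.List.pyGetD A (i - 1) 0
  let s := (PySem.List.pyRange (i - 1) (-1) (-1)).foldl (innerStep A dp) (a, a, 0)
  PySem.List.pySetD dp i s.2.2

def solve (N : Int) (A : List Int) : Int :=
  let dp := (PySem.List.pyRange 1 (N + 1) 1).foldl (outerStep A) (PySem.List.pyRepeat [0] (N + 1))
  PySem.List.pyGetD dp N 0

-- ===== PORT B =====
-- loop body of Source B: update all candidates with x, append (x, x, best), take the max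
def altStep (st : Int × List (Int × Int × Int)) (x : Int) : Int × List (Int × Int × Int) :=
  let cands := (st.2.map (fun t => (if t.1 > x then t.1 else x, if t.2.1 < x then t.2.1 else x, t.2.2))) ++ [(x, x, st.1)]
  let best := (PySem.List.max? (cands.map (fun t => t.2.2 + (t.1 - t.2.1))) (fun y => y)).getD 0
  (best, cands)

def solve_alt (N : Int) (A : List Int) : Int :=
  ((PySem.List.pyRange 0 N 1).foldl (fun st i => altStep st (PySem.List.pyGetD A i 0)) (0, [])).1

-- ===== PRECONDITION & SPEC =====
-- Pre_: exactly the inputs where A returns (otherwise A[i-1] or dp[N] raises IndexError)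
def Pre_solve (N : Int) (A : List Int) : Prop := 0 ≤ N ∧ N ≤ (A.length : Int)
instance (N : Int) (A : List Int) : Decidable (Pre_solve N A) := by unfold Pre_solve; infer_instance
def pvWitness_solve : Int × List Int := (3, [5, 1, 4])

def Spec_solve (N : Int) (A : List Int) (out : Int) : Prop := out = solve_alt N A
instance (N : Int) (A : List Int) (out : Int) : Decidable (Spec_solve N A out) := by unfold Spec_solve; infer_instance

-- ===== CLAIM (what is proved, stated in full; the proofs are below) =====
def Claim_equal_solve : Prop := ∀ (N : Int) (A : List Int), Dom_solve N A → Pre_solve N A → Spec_solve N A (solve N A)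

-- ===== LEMMAS AND PROOFS =====

-- B's fold state over a processed prefix, and its two components
def bst (xs : List Int) : Int × List (Int × Int × Int) := xs.foldl altStep (0, [])
def bv (xs : List Int) : Int := (bst xs).1
def cs (xs : List Int) : List (Int × Int × Int) := (bst xs).2

-- A's inner loop rephrased over (element, dp value) pairs
def pairStep (s : Int × Int × Int) (p : Int × Int) : Int × Int × Int :=
  let mx := if p.1 > s.1 then p.1 else s.1
  let mn := if p.1 < s.2.1 then p.1 else s.2.1
  let val := p.2 + (mx - mn)
  (mx, mn, if val > s.2.2 then val else s.2.2)

-- the candidate values A's inner loop scans, with running max/min accumulators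
def candVals (mx mn : Int) : List (Int × Int) → List Int
  | [] => []
  | p :: ps => (p.2 + (max mx p.1 - min mn p.1)) :: candVals (max mx p.1) (min mn p.1) ps

-- descending (element, dp value) pairs of a prefix
def dpairs (xs : List Int) : List (Int × Int) :=
  (xs.zip ((List.range xs.length).map (fun j => bv (xs.take j)))).reverse

theorem ite_max (a b : Int) : (if a > b then a else b) = max a b := by rw [max_def]; split_ifs <;> omega
theorem ite_min (a b : Int) : (if a < b then a else b) = min a b := by rw [min_def]; split_ifs <;> omega

theorem bst_append (xs : List Int) (x : Int) : bst (xs ++ [x]) = altStep (bst xs) x := by simp [bst, List.foldl_append]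

theorem cs_append (xs : List Int) (x : Int) :
    cs (xs ++ [x]) = (cs xs).map (fun t => (max t.1 x, min t.2.1 x, t.2.2)) ++ [(x, x, bv xs)] := by
  rw [cs, bst_append, altStep]
  simp only [cs, bv]
  congr 1
  apply List.map_congr_left
  intro t _
  rw [ite_max, ite_min]

theorem bv_append (xs : List Int) (x : Int) :
    bv (xs ++ [x]) = (PySem.List.max? ((cs (xs ++ [x])).map (fun t => t.2.2 + (t.1 - t.2.1))) (fun y => y)).getD 0 := by
  rw [bv, bst_append, cs_append, altStep]
  simp only [cs, bv, List.map_append, List.map_map]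
  have h : ∀ t : Int × Int × Int,
      ((fun t : Int × Int × Int => t.2.2 + (t.1 - t.2.1)) ∘ fun t : Int × Int × Int =>
        (if t.1 > x then t.1 else x, if t.2.1 < x then t.2.1 else x, t.2.2)) t
      = ((fun t : Int × Int × Int => t.2.2 + (t.1 - t.2.1)) ∘ fun t : Int × Int × Int =>
        (max t.1 x, min t.2.1 x, t.2.2)) t := by
    intro t; simp only [Function.comp_apply, ite_max, ite_min]
  rw [List.map_congr_left (fun t _ => h t)]

theorem cs_bounds (xs : List Int) (x : Int) (t : Int × Int × Int) (ht : t ∈ cs (xs ++ [x])) :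
    t.2.1 ≤ x ∧ x ≤ t.1 := by
  rw [cs_append] at ht
  rcases List.mem_append.1 ht with h | h
  · rcases List.mem_map.1 h with ⟨u, _, rfl⟩
    constructor
    · exact min_le_right _ _
    · exact le_max_right _ _
  · simp at h
    subst h
    exact ⟨le_refl x, le_refl x⟩

theorem cs_head_zero (xs : List Int) (h : xs ≠ []) : ∃ c cr, cs xs = c :: cr ∧ c.2.2 = 0 := by
  induction xs using List.reverseRecOn with
  | nil => exact absurd rfl h
  | append_singleton ys x ih =>
    rw [cs_append]
    by_cases hy : ys = []
    · subst hy
      exact ⟨(x, x, bv []), [], by simp [cs, bst], rfl⟩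
    · rcases ih hy with ⟨c, cr, hcs, hc⟩
      rw [hcs]
      exact ⟨(max c.1 x, min c.2.1 x, c.2.2), _, rfl, hc⟩

theorem dpairs_append (xs : List Int) (x : Int) : dpairs (xs ++ [x]) = (x, bv xs) :: dpairs xs := by
  unfold dpairs
  rw [List.length_append]
  simp only [List.length_singleton, List.range_succ, List.map_append]
  have hmap : (List.range xs.length).map (fun j => bv ((xs ++ [x]).take j))
      = (List.range xs.length).map (fun j => bv (xs.take j)) := by
    apply List.map_congr_left
    intro j hj
    rw [List.mem_range] at hj
    rw [List.take_append_of_le_length (le_of_lt hj)]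
  rw [hmap, List.map_singleton, List.take_left, List.zip_append (by simp)]
  simp [List.reverse_append]

theorem foldl_max_swap (l : List Int) (a b : Int) :
    l.foldl max (max b a) = max (l.foldl max b) a := by
  induction l generalizing b with
  | nil => rfl
  | cons c l ih =>
    simp only [List.foldl_cons]
    rw [max_right_comm b a c, ih]

theorem foldl_lookup_take {β : Type} (A : List Int) (n : Nat) (hn : n ≤ A.length)
    (f : β → Int → β) (init : β) :
    (List.range n).foldl (fun acc k => f acc (A.getD k 0)) init = (A.take n).foldl f init := by
  induction n generalizing init with
  | zero => rfl
  | succ m ih =>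
    rw [List.range_succ, List.foldl_append, ih (by omega),
      List.take_succ_eq_append_getElem (by omega), List.foldl_append]
    simp [List.getElem?_eq_getElem (show m < A.length by omega)]

theorem candVals_eq (xs : List Int) (mx mn : Int) :
    candVals mx mn (dpairs xs)
      = ((cs xs).map (fun t => t.2.2 + (max t.1 mx - min t.2.1 mn))).reverse := by
  induction xs using List.reverseRecOn generalizing mx mn with
  | nil => rfl
  | append_singleton ys x ih =>
    rw [dpairs_append, cs_append, candVals, ih (max mx x) (min mn x)]
    simp only [List.map_append, List.map_map, List.map_singleton, List.reverse_append,
      List.reverse_cons, List.reverse_nil, List.nil_append, List.cons_append]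
    congr 1
    · rw [max_comm mx x, min_comm mn x]
    · congr 1
      apply List.map_congr_left
      intro t _
      simp only [Function.comp_apply]
      rw [max_assoc, min_assoc, max_comm x mx, min_comm x mn]

theorem foldl_pairStep_third (ps : List (Int × Int)) (mx mn b : Int) :
    ((ps.foldl pairStep (mx, mn, b)).2.2) = List.foldl max b (candVals mx mn ps) := by
  induction ps generalizing mx mn b with
  | nil => rfl
  | cons p ps ih =>
    simp only [List.foldl_cons, candVals]
    rw [show pairStep (mx, mn, b) p
        = (max mx p.1, min mn p.1, max b (p.2 + (max mx p.1 - min mn p.1))) by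
      simp only [pairStep, ite_max, ite_min]
      rw [max_comm p.1 mx, min_comm p.1 mn, max_comm (p.2 + (max mx p.1 - min mn p.1)) b]]
    exact ih _ _ _

theorem foldl_max_reverse (l : List Int) (b : Int) : l.reverse.foldl max b = l.foldl max b := by
  induction l generalizing b with
  | nil => rfl
  | cons a l ih =>
    simp only [List.reverse_cons, List.foldl_append, List.foldl_cons, List.foldl_nil]
    rw [ih, foldl_max_swap]

-- A's whole inner loop is the pairStep fold over the descending pairs of the prefix
theorem inner_eq_pairs (A dp : List Int) (m : Nat) (st : Int × Int × Int)
    (hm : m ≤ A.length)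
    (hdp : ∀ j : Nat, j < m → PySem.List.pyGetD dp (j : Int) 0 = bv (A.take j)) :
    (PySem.List.pyRange ((m : Int) - 1) (-1) (-1)).foldl (innerStep A dp) st
      = (dpairs (A.take m)).foldl pairStep st := by
  induction m generalizing st with
  | zero =>
    rw [show ((0 : Nat) : Int) - 1 = -1 by ring, PySem.List.pyRange_neg_one_eq_nil (by omega)]
    rfl
  | succ m ih =>
    have hmlt : m < A.length := by omega
    rw [show ((m + 1 : Nat) : Int) - 1 = (m : Int) by push_cast; ring,
      PySem.List.pyRange_neg_one_cons (by omega),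
      List.take_succ_eq_append_getElem hmlt, dpairs_append]
    simp only [List.foldl_cons]
    have hstep : innerStep A dp st (m : Int) = pairStep st (A[m], bv (A.take m)) := by
      simp only [innerStep, pairStep, PySem.List.pyGetD_natCast,
        List.getD_eq_getElem A 0 hmlt, hdp m (by omega)]
    rw [hstep]
    exact ih _ (by omega) (fun j hj => hdp j (by omega))

-- the key step: A's inner-loop best at i = m+1 is B's dp value of the (m+1)-prefix
theorem inner_best (A : List Int) (m : Nat) (hm : m < A.length) :
    ((dpairs (A.take (m + 1))).foldl pairStep (A[m], A[m], 0)).2.2 = bv (A.take (m + 1)) := by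
  have hx : A.take (m + 1) = A.take m ++ [A[m]] := List.take_succ_eq_append_getElem hm
  rw [foldl_pairStep_third, candVals_eq, foldl_max_reverse]
  have hmap : (cs (A.take (m + 1))).map (fun t => t.2.2 + (max t.1 A[m] - min t.2.1 A[m]))
      = (cs (A.take (m + 1))).map (fun t => t.2.2 + (t.1 - t.2.1)) := by
    apply List.map_congr_left
    intro t ht
    rw [hx] at ht
    obtain ⟨h1, h2⟩ := cs_bounds _ _ _ ht
    rw [max_eq_left h2, min_eq_left h1]
  rw [hmap]
  obtain ⟨c, cr, hcs, hc0⟩ := cs_head_zero (A.take (m + 1))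
    (by rw [hx]; exact List.append_ne_nil_of_right_ne_nil _ (by simp))
  have hcmem : c ∈ cs (A.take (m + 1)) := by rw [hcs]; exact List.mem_cons_self
  obtain ⟨hb1, hb2⟩ := cs_bounds _ _ _ (by rw [← hx]; exact hcmem)
  have hfc : 0 ≤ c.2.2 + (c.1 - c.2.1) := by rw [hc0]; omega
  rw [hx, bv_append, ← hx, hcs]
  simp only [List.map_cons, List.foldl_cons, PySem.List.max?_id_cons, Option.getD_some]
  rw [max_eq_right hfc]

-- the outer-loop invariant: the dp array is B's dp values followed by untouched zeros
theorem outer_inv (A : List Int) (n m : Nat) (hmn : m ≤ n) (hn : n ≤ A.length) :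
    ((List.range m).map (fun k : Nat => (1 : Int) + (k : Int))).foldl (outerStep A) (List.replicate (n + 1) 0)
      = (List.range (m + 1)).map (fun j => bv (A.take j)) ++ List.replicate (n - m) 0 := by
  induction m with
  | zero =>
    simp [List.range_succ, bv, bst, List.replicate_succ]
  | succ m ih =>
    rw [List.range_succ, List.map_append, List.foldl_append, ih (by omega)]
    have hmlt : m < A.length := by omega
    have hL : ((List.range (m + 1)).map (fun j => bv (A.take j))).length = m + 1 := by simp
    set L := (List.range (m + 1)).map (fun j => bv (A.take j)) with hLdef
    simp only [List.map_singleton, List.foldl_cons, List.foldl_nil]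
    rw [outerStep]
    have hi1 : (1 : Int) + (m : Int) - 1 = ((m : Nat) : Int) := by ring
    have hdp : ∀ j : Nat, j < m + 1 →
        PySem.List.pyGetD (L ++ List.replicate (n - m) 0) (j : Int) 0 = bv (A.take j) := by
      intro j hj
      rw [PySem.List.pyGetD_natCast, List.getD_append _ _ _ _ (by omega),
        hLdef, PySem.List.getD_map_range _ _ _ _ hj]
    have ha : PySem.List.pyGetD A ((1 : Int) + (m : Int) - 1) 0 = A[m] := by
      rw [hi1, PySem.List.pyGetD_natCast, List.getD_eq_getElem A 0 hmlt]
    rw [ha, hi1, show ((m : Nat) : Int) = ((m + 1 : Nat) : Int) - 1 by push_cast; ring,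
      inner_eq_pairs A _ (m + 1) _ (by omega) hdp, inner_best A m hmlt]
    rw [show (1 : Int) + (((m + 1 : Nat) : Int) - 1) = ((m + 1 : Nat) : Int) by push_cast; ring,
      PySem.List.pySetD_natCast]
    rw [show m + 1 = L.length by omega]
    have hrep : (List.replicate (n - m) 0).set 0 (bv (A.take (m + 1)))
        = bv (A.take (m + 1)) :: List.replicate (n - (m + 1)) 0 := by
      rw [show n - m = (n - (m + 1)) + 1 by omega, List.replicate_succ]
      rfl
    simp only [List.set_append, hL]
    simp only [Nat.sub_self]
    rw [hrep, hLdef]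
    simp [List.range_succ]

-- ===== VERDICT (by name: the statement is the Claim_ definition above) =====
theorem solve_spec : Claim_equal_solve := by
  intro N A hdom hpre
  unfold Spec_solve
  obtain ⟨h0, hlen⟩ := hpre
  obtain ⟨n, rfl⟩ : ∃ n : Nat, N = (n : Int) := ⟨N.toNat, (Int.toNat_of_nonneg h0).symm⟩
  have hn : n ≤ A.length := by exact_mod_cast hlen
  unfold solve solve_alt
  rw [PySem.List.pyRepeat_singleton,
    show ((n : Int) + 1).toNat = n + 1 by omega, PySem.List.pyRange_one,
    show (((n : Nat) : Int) + 1 - 1).toNat = n by omega]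
  rw [outer_inv A n n (le_refl n) hn]
  simp only [Nat.sub_self, List.replicate_zero, List.append_nil]
  rw [PySem.List.pyGetD_natCast, PySem.List.getD_map_range _ _ _ _ (by omega)]
  rw [PySem.List.pyRange_zero_natCast]
  have : ∀ (init : Int × List (Int × Int × Int)),
      ((List.range n).map (fun k : Nat => (k : Int))).foldl
        (fun st i => altStep st (PySem.List.pyGetD A i 0)) init
      = (A.take n).foldl altStep init := by
    intro init
    rw [List.foldl_map]
    simpa using foldl_lookup_take A n hn (f := altStep) init
  rw [this]
  rfl
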